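-- pv_equiv track=rewrite | github.com/PsychoPo/KURS_IStoSPP | calculating.py | jons_final_seq
-- ===== SOURCE A (Python) =====
-- from copy import deepcopy, copy
--
-- def jons_final_seq(r1, r2, r3):
--     r = []
--     sum = []
--
--     for i in range(len(r1)):
--         for a in range(len(r1)):
--             if i == r1[a]:
--                 sum.append(a + 1)
--         for b in range(len(r2)):
--             if i == r2[b]:
--                 sum[i] += (b + 1)
--         for c in range(len(r3)):
--             if i == r3[c]:
--                 sum[i] += (c + 1)
--
--     sumcopy = deepcopy(sum)
--     sumcopy.sort()
--
--     for i in sumcopy: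
--         for j in range(len(sum)):
--             if i == sum[j]:
--                 r.append(j + 1)
--
--     r = list(dict.fromkeys(r))
--
--     return r
-- ===== SOURCE B (Python) =====
-- def jons_final_seq(r1, r2, r3):
--     n = len(r1)
--     pos = {}
--     for a, v in enumerate(r1, 1):
--         pos.setdefault(v, []).append(a)
--     sums = []
--     for i in range(n):
--         sums += pos.get(i, [])
--     for r in (r2, r3):
--         for b, v in enumerate(r, 1):
--             if 0 <= v < n:
--                 sums[v] += b
--     order = {}
--     for j, v in enumerate(sums, 1):
--         order.setdefault(v, []).append(j)
--     out = []
--     for v in sorted(order):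
--         out += order[v]
--     return out
-- ===== Notes on version B (the rewrite author's own statement) =====
-- stated objective: faster
-- what changed: Replaces A's per-value quadratic position scans, comparison sort of the whole summed-rank list and quadratic rescan-plus-dedup with one dict grouping pass per list plus two enumerate passes, and a group-by-value dict whose distinct keys alone are sorted and concatenated.
import Mathlib
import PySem

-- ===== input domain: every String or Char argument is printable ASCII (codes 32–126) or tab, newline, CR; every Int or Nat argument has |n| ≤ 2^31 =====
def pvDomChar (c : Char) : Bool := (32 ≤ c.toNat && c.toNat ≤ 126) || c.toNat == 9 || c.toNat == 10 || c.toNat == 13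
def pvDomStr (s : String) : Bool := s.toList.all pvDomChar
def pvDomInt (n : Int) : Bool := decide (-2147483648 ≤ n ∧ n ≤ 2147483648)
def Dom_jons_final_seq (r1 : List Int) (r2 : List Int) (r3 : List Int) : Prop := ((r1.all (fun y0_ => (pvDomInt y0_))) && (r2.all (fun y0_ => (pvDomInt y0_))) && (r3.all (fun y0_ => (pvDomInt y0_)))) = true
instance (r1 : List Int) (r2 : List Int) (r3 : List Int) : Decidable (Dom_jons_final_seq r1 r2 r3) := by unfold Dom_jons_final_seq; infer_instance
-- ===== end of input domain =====

-- B replaces A's quadratic per-value position scans, sort of the whole summed-rank list and quadratic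
-- rescan-plus-dedup by dict-grouping passes and a sort of the distinct summed ranks only; proved equal
-- to A on Pre_, which is exactly the set of inputs on which A returns normally.


-- ===== PORT A =====
-- Literal transliteration of A; one outer-loop iteration (the three inner scans) is the helper pvA_step.
-- `sum[i] += …` is a Python list update that raises IndexError when i ≥ len(sum); here `List.modify`
-- is a no-op there, which is only reachable outside Pre_.
def pvA_step (r1 : List Int) (r2 : List Int) (r3 : List Int) (sum : List Int) (i : Nat) : List Int :=
  let sum := (List.range r1.length).foldl
    (fun s a => if (i : Int) = r1.getD a 0 then s ++ [(a : Int) + 1] else s) sum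
  let sum := (List.range r2.length).foldl
    (fun s b => if (i : Int) = r2.getD b 0 then s.modify i (· + ((b : Int) + 1)) else s) sum
  let sum := (List.range r3.length).foldl
    (fun s c => if (i : Int) = r3.getD c 0 then s.modify i (· + ((c : Int) + 1)) else s) sum
  sum

def jons_final_seq (r1 : List Int) (r2 : List Int) (r3 : List Int) : List Int :=
  let sum : List Int := (List.range r1.length).foldl (pvA_step r1 r2 r3) []
  let sumcopy := PySem.List.sorted sum (fun x => x) false
  let r : List Int := sumcopy.foldl (fun r v =>
    (List.range sum.length).foldl
      (fun r j => if v = sum.getD j 0 then r ++ [(j : Int) + 1] else r) r) []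
  PySem.List.dedup r

-- ===== PORT B =====
-- Transliteration of Source B.  pvB_group is the `setdefault(v, []).append(idx)` grouping loop (used for
-- both `pos` and `order`); pvB_addPass is one `for b, v in enumerate(r, 1): if 0 <= v < n: sums[v] += b`
-- pass.  `sums[v] += b` is exact whenever v < len(sums) (always the case inside Pre_); out of range,
-- `List.modify` is a no-op where Python raises IndexError (only reachable outside Pre_).
def pvB_group (l : List Int) : PySem.Dict Int (List Int) :=
  (PySem.List.enumerate l 1).foldl (fun d p => d.modify p.2 [] (· ++ [p.1])) PySem.Dict.empty

def pvB_addPass (n : Nat) (s : List Int) (r : List Int) : List Int :=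
  (PySem.List.enumerate r 1).foldl
    (fun s p => if 0 ≤ p.2 ∧ p.2 < (n : Int) then s.modify p.2.toNat (· + p.1) else s) s

def jons_final_seq_alt (r1 : List Int) (r2 : List Int) (r3 : List Int) : List Int :=
  let n := r1.length
  let pos := pvB_group r1
  let sums : List Int := (List.range n).foldl (fun s (i : Nat) => s ++ pos.getD (i : Int) []) []
  let sums := pvB_addPass n (pvB_addPass n sums r2) r3
  let order := pvB_group sums
  (PySem.List.sorted order.keys (fun x => x) false).foldl (fun out v => out ++ order.getD v []) []

-- ===== PRECONDITION & SPEC =====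
-- Pre_ is exactly the set of inputs on which A returns normally: A raises IndexError (at `sum[i] += …`)
-- iff some i < len(r1) that occurs in r2 or r3 has at most i elements of r1 lying in 0..i.
def Pre_jons_final_seq (r1 : List Int) (r2 : List Int) (r3 : List Int) : Prop :=
  ∀ i : Nat, i < r1.length → ((i : Int) ∈ r2 ∨ (i : Int) ∈ r3) →
    i < r1.countP (fun x => decide (0 ≤ x ∧ x ≤ (i : Int)))
instance (r1 : List Int) (r2 : List Int) (r3 : List Int) : Decidable (Pre_jons_final_seq r1 r2 r3) := by
  unfold Pre_jons_final_seq; infer_instance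

def pvWitness_jons_final_seq : List Int × List Int × List Int := ([2, 0, 1, 3], [0, 1, 3, 2], [1, 0, 2, 3])

def Spec_jons_final_seq (r1 : List Int) (r2 : List Int) (r3 : List Int) (out : List Int) : Prop := out = jons_final_seq_alt r1 r2 r3
instance (r1 : List Int) (r2 : List Int) (r3 : List Int) (out : List Int) : Decidable (Spec_jons_final_seq r1 r2 r3 out) := by unfold Spec_jons_final_seq; infer_instance

-- ===== CLAIM (what is proved, stated in full; the proofs are below) =====
def Claim_equal_jons_final_seq : Prop := ∀ (r1 : List Int) (r2 : List Int) (r3 : List Int), Dom_jons_final_seq r1 r2 r3 → Pre_jons_final_seq r1 r2 r3 → Spec_jons_final_seq r1 r2 r3 (jons_final_seq r1 r2 r3)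

-- ===== LEMMAS AND PROOFS =====

-- 1-based positions of value v in l, in increasing order (= A's inner append scan, = B's group lists).
def pvBlockOf (l : List Int) (v : Int) : List Int :=
  ((List.range l.length).filter (fun j => decide (v = l.getD j 0))).map (fun (j : Nat) => (j : Int) + 1)

-- The `sum` list after A's append loops for values 0..m-1.
def pvBase (r1 : List Int) (m : Nat) : List Int :=
  (List.range m).flatMap (fun (i : Nat) => pvBlockOf r1 (i : Int))

-- Total 1-based-position weight of value k in rl (the increment A adds at sum[k]).
def pvInc (rl : List Int) (k : Nat) : Int := (pvBlockOf rl (k : Int)).sum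

-- Same with positions counted from offset k0 (for the enumerate(r, k0) induction).
def pvIncOff (rl : List Int) (k0 : Int) (k : Nat) : Int :=
  (((List.range rl.length).filter (fun b => decide ((k : Int) = rl.getD b 0))).map
    (fun (b : Nat) => (b : Int) + k0)).sum

-- The common summed-rank list both programs compute.
def pvSums (r1 r2 r3 : List Int) : List Int :=
  (pvBase r1 r1.length).mapIdx
    (fun k x => if k < r1.length then x + pvInc r2 k + pvInc r3 k else x)

-- First-occurrence dedup, structurally (proved equal to PySem.List.dedup below).
def pvD : List Int → List Int
  | [] => []
  | x :: t => x :: pvD (t.filter (fun y => !(y == x)))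
  termination_by l => l.length
  decreasing_by simp; exact le_trans (List.length_filter_le _ _) (by simp)


lemma pvD_ind (motive : List Int → Prop) (h0 : motive [])
    (h1 : ∀ y t, motive (t.filter (fun z => !(z == y))) → motive (y :: t)) : ∀ l, motive l := by
  have key : ∀ n (l : List Int), l.length ≤ n → motive l := by
    intro n
    induction n with
    | zero =>
      intro l hl
      rw [Nat.le_zero, List.length_eq_zero_iff] at hl
      exact hl ▸ h0
    | succ n ih =>
      intro l hl
      cases l with
      | nil => exact h0
      | cons y t =>
        refine h1 y t (ih _ (le_trans (List.length_filter_le _ _) ?_))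
        simpa [Nat.succ_le_succ_iff] using hl
  exact fun l => key l.length l le_rfl


lemma pvD_mem (l : List Int) (x : Int) : x ∈ pvD l ↔ x ∈ l := by
  induction l using pvD_ind with
  | h0 => simp [pvD]
  | h1 y t ih =>
    rw [pvD]
    by_cases hxy : x = y
    · simp [hxy]
    · simp [List.mem_cons, hxy, ih, List.mem_filter]

lemma pvD_sublist (l : List Int) : (pvD l).Sublist l := by
  induction l using pvD_ind with
  | h0 => simp [pvD]
  | h1 y t ih =>
    rw [pvD]
    exact List.Sublist.cons₂ y (ih.trans List.filter_sublist)

lemma pvD_nodup (l : List Int) : (pvD l).Nodup := by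
  induction l using pvD_ind with
  | h0 => simp [pvD]
  | h1 y t ih =>
    rw [pvD, List.nodup_cons]
    refine ⟨fun hmem => ?_, ih⟩
    have := (pvD_mem _ y).mp hmem
    simp [List.mem_filter] at this

lemma pvD_of_nodup (l : List Int) (h : l.Nodup) : pvD l = l := by
  induction l using pvD_ind with
  | h0 => simp [pvD]
  | h1 y t ih =>
    rw [pvD]
    have hft : t.filter (fun z => !(z == y)) = t := by
      rw [List.filter_eq_self]
      intro a ha
      simp only [Bool.not_eq_eq_eq_not, Bool.not_true, beq_eq_false_iff_ne]
      intro hay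
      exact (List.nodup_cons.mp h).1 (hay ▸ ha)
    rw [hft] at ih ⊢
    rw [ih (List.nodup_cons.mp h).2]

lemma pvD_append (xs ys : List Int) :
    pvD (xs ++ ys) = pvD xs ++ pvD (ys.filter (fun y => !(xs.contains y))) := by
  induction xs using pvD_ind generalizing ys with
  | h0 => simp [pvD]
  | h1 x t ih =>
    rw [List.cons_append, pvD, pvD, List.filter_append, ih, List.filter_filter]
    have harg : List.filter (fun a => !(List.filter (fun z => !(z == x)) t).contains a && !(a == x)) ys
        = List.filter (fun y => !(x :: t).contains y) ys := by
      apply List.filter_congr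
      intro a _
      by_cases hax : a = x
      · simp [hax]
      · simp [hax, List.mem_filter]
    rw [harg]
    simp

lemma pv_foldl_add (l acc : List Int) :
    l.foldl PySem.Set.add acc = acc ++ pvD (l.filter (fun x => !(acc.contains x))) := by
  induction l generalizing acc with
  | nil => simp [pvD]
  | cons a t ih =>
    rw [List.foldl_cons, List.filter_cons]
    by_cases h : acc.contains a
    · rw [show PySem.Set.add acc a = acc from by unfold PySem.Set.add PySem.Set.contains; rw [if_pos h], ih acc, h]
      simp
    · rw [show PySem.Set.add acc a = acc ++ [a] from by unfold PySem.Set.add PySem.Set.contains; rw [if_neg h],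
        ih (acc ++ [a])]
      have h' : (!acc.contains a) = true := by simpa using h
      rw [if_pos h']
      rw [pvD, List.filter_filter, List.append_assoc, List.cons_append, List.nil_append]
      congr 3
      apply List.filter_congr
      intro x _
      by_cases hxa : x = a
      · simp [hxa]
      · simp [hxa, List.contains_eq_mem]

lemma pv_dedup_eq_pvD (l : List Int) : PySem.List.dedup l = pvD l := by
  rw [PySem.List.dedup_eq_ofList, PySem.Set.ofList_eq_foldl, pv_foldl_add]
  simp

lemma pv_flatMap_drop (t : List Int) (v : Int) (f g : Int → List Int)
    (h : ∀ w ∈ t, g w = if w = v then [] else f w) :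
    t.flatMap g = (t.filter (fun w => !(w == v))).flatMap f := by
  induction t with
  | nil => simp
  | cons w t ih =>
    rw [List.flatMap_cons, List.filter_cons, ih (fun z hz => h z (List.mem_cons_of_mem w hz))]
    by_cases hwv : w = v
    · subst hwv
      simp [h w List.mem_cons_self]
    · simp [h w List.mem_cons_self, hwv]

lemma pvD_flatMap (l : List Int) (f : Int → List Int) (hnd : ∀ v, (f v).Nodup)
    (hdisj : ∀ v w x, v ≠ w → x ∈ f v → x ∉ f w) :
    pvD (l.flatMap f) = (pvD l).flatMap f := by
  induction l using pvD_ind with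
  | h0 => simp [pvD]
  | h1 v t ih =>
    rw [List.flatMap_cons, pvD_append, pvD_of_nodup _ (hnd v), List.filter_flatMap, pvD, List.flatMap_cons]
    congr 1
    rw [← ih]
    congr 1
    apply pv_flatMap_drop
    intro w _
    by_cases hwv : w = v
    · subst hwv
      rw [if_pos rfl, List.filter_eq_nil_iff]
      intro a ha
      simp [List.contains_eq_mem, ha]
    · rw [if_neg hwv, List.filter_eq_self]
      intro a ha
      simp only [List.contains_eq_mem, Bool.not_eq_eq_eq_not, Bool.not_true, decide_eq_false_iff_not]
      exact hdisj w v a hwv ha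

lemma pv_modify_modify (l : List Int) (i : Nat) (f g : Int → Int) :
    (l.modify i f).modify i g = l.modify i (fun x => g (f x)) := by
  apply List.ext_getElem
  · simp
  · intro j h1 h2
    simp only [List.getElem_modify]
    by_cases h : i = j <;> simp [h]

lemma pv_modify_add_zero (l : List Int) (i : Nat) : l.modify i (· + (0 : Int)) = l := by
  apply List.ext_getElem
  · simp
  · intro j h1 h2
    simp only [List.getElem_modify]
    split <;> simp

lemma pv_modify_fold2 {α : Type} (L : List α) (P : α → Prop) [DecidablePred P] (g : α → Int)
    (i : Nat) : ∀ s : List Int,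
    L.foldl (fun s b => if P b then s.modify i (· + g b) else s) s
      = s.modify i (· + ((L.filter (fun b => decide (P b))).map g).sum) := by
  induction L with
  | nil =>
    intro s
    rw [List.foldl_nil, List.filter_nil, List.map_nil, List.sum_nil]
    exact (pv_modify_add_zero s i).symm
  | cons b L ih =>
    intro s
    rw [List.foldl_cons]
    by_cases h : P b
    · rw [if_pos h, ih, pv_modify_modify]
      simp only [List.filter_cons, h, decide_true, if_true, List.map_cons, List.sum_cons]
      congr 1
      funext x
      ring
    · rw [if_neg h, ih]
      simp [h]

lemma pv_range_filter_length (l : List Int) (p : Int → Bool) :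
    ((List.range l.length).filter (fun a => p (l.getD a 0))).length = l.countP p := by
  induction l with
  | nil => simp
  | cons y t ih =>
    rw [List.length_cons, List.range_succ_eq_map, List.filter_cons, List.filter_map]
    have htail : List.filter ((fun a => p ((y :: t).getD a 0)) ∘ Nat.succ) (List.range t.length)
        = List.filter (fun a => p (t.getD a 0)) (List.range t.length) := by
      apply List.filter_congr
      intro a _
      simp [Function.comp]
    rw [htail]
    simp only [List.getD_cons_zero]
    by_cases h : p y
    · rw [if_pos h, List.length_cons, List.length_map, ih, List.countP_cons, if_pos h]
    · rw [if_neg h, List.length_map, ih, List.countP_cons, if_neg h]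
      omega

lemma pv_countP_split (l : List Int) (m : Nat) :
    l.countP (fun x => decide (0 ≤ x ∧ x < ((m : Int) + 1)))
      = l.countP (fun x => decide (0 ≤ x ∧ x < (m : Int)))
        + l.countP (fun x => decide ((m : Int) = x)) := by
  induction l with
  | nil => simp
  | cons y t ih =>
    simp only [List.countP_cons, ih, decide_eq_true_eq]
    split_ifs <;> omega

lemma pv_base_length (r1 : List Int) (m : Nat) :
    (pvBase r1 m).length = r1.countP (fun x => decide (0 ≤ x ∧ x < (m : Int))) := by
  induction m with
  | zero =>
    simp only [pvBase, List.range_zero, List.flatMap_nil, List.length_nil]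
    symm
    rw [List.countP_eq_zero]
    intro x _
    simp only [decide_eq_true_eq]
    omega
  | succ m ih =>
    rw [pvBase, List.range_succ, List.flatMap_append, List.flatMap_singleton, List.length_append]
    rw [show (List.range m).flatMap (fun (i : Nat) => pvBlockOf r1 (i : Int)) = pvBase r1 m from rfl, ih]
    rw [pvBlockOf, List.length_map,
      pv_range_filter_length r1 (fun x => decide (((m : Nat) : Int) = x))]
    have : ((m + 1 : Nat) : Int) = (m : Int) + 1 := by push_cast; ring
    rw [this, pv_countP_split]

lemma pv_blockOf_nodup (l : List Int) (v : Int) : (pvBlockOf l v).Nodup :=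
  List.Nodup.map (fun a b h => by omega) (List.Nodup.filter _ List.nodup_range)

lemma pv_blockOf_disj (l : List Int) :
    ∀ v w x, v ≠ w → x ∈ pvBlockOf l v → x ∉ pvBlockOf l w := by
  intro v w x hvw hxv hxw
  simp only [pvBlockOf, List.mem_map, List.mem_filter, List.mem_range, decide_eq_true_eq] at hxv hxw
  obtain ⟨j, ⟨hj, hvj⟩, hx⟩ := hxv
  obtain ⟨j', ⟨hj', hwj⟩, hx'⟩ := hxw
  have : j = j' := by omega
  exact hvw (by rw [hvj, hwj, this])

lemma pvInc_zero_of_not_mem (rl : List Int) (k : Nat) (h : (k : Int) ∉ rl) : pvInc rl k = 0 := by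
  unfold pvInc pvBlockOf
  have hf : List.filter (fun j => decide ((k : Int) = rl.getD j 0)) (List.range rl.length) = [] := by
    rw [List.filter_eq_nil_iff]
    intro a ha
    simp only [List.mem_range] at ha
    simp only [decide_eq_true_eq]
    intro hcon
    exact h (by rw [hcon, List.getD_eq_getElem rl 0 ha]; exact List.getElem_mem ha)
  rw [hf]
  simp

lemma pv_incOff_cons (x : Int) (t : List Int) (k0 : Int) (k : Nat) :
    pvIncOff (x :: t) k0 k = (if (k : Int) = x then k0 else 0) + pvIncOff t (k0 + 1) k := by
  unfold pvIncOff
  rw [List.length_cons, List.range_succ_eq_map, List.filter_cons, List.filter_map]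
  have htail : List.filter ((fun b => decide ((k : Int) = (x :: t).getD b 0)) ∘ Nat.succ)
        (List.range t.length)
      = List.filter (fun b => decide ((k : Int) = t.getD b 0)) (List.range t.length) := by
    apply List.filter_congr
    intro a _
    simp [Function.comp]
  rw [htail]
  have hmap : ∀ L : List Nat,
      (L.map Nat.succ).map (fun (b : Nat) => (b : Int) + k0)
        = L.map (fun (b : Nat) => (b : Int) + (k0 + 1)) := by
    intro L
    rw [List.map_map]
    apply List.map_congr_left
    intro b _
    simp only [Function.comp]
    push_cast
    ring
  by_cases h : (k : Int) = x
  · rw [if_pos (by simpa using h), if_pos h, List.map_cons, List.sum_cons, hmap]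
    simp
  · rw [if_neg (by simpa using h), if_neg h, hmap]
    simp

lemma pv_addPass_fold (n : Nat) (rl : List Int) : ∀ (k0 : Int) (s : List Int),
    (PySem.List.enumerate rl k0).foldl
        (fun s p => if 0 ≤ p.2 ∧ p.2 < (n : Int) then s.modify p.2.toNat (· + p.1) else s) s
      = s.mapIdx (fun k x => if k < n then x + pvIncOff rl k0 k else x) := by
  induction rl with
  | nil =>
    intro k0 s
    simp only [PySem.List.enumerate, List.foldl_nil]
    apply List.ext_getElem
    · simp
    · intro j h1 h2
      simp only [List.getElem_mapIdx]
      have hz : pvIncOff [] k0 j = 0 := by simp [pvIncOff]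
      rw [hz]
      split <;> simp
  | cons x t ih =>
    intro k0 s
    rw [PySem.List.enumerate_cons, List.foldl_cons]
    by_cases hg : 0 ≤ x ∧ x < (n : Int)
    · have hstep : (if 0 ≤ ((k0, x) : Int × Int).2 ∧ ((k0, x) : Int × Int).2 < (n : Int) then
            s.modify ((k0, x) : Int × Int).2.toNat (· + ((k0, x) : Int × Int).1) else s)
          = s.modify x.toNat (· + k0) := by
        simp only []
        rw [if_pos hg]
      rw [hstep, ih]
      apply List.ext_getElem
      · simp
      · intro j h1 h2
        simp only [List.getElem_mapIdx, List.getElem_modify, pv_incOff_cons]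
        have hxn : x.toNat < n := by omega
        by_cases hje : x.toNat = j
        · have hjx : (j : Int) = x := by omega
          subst hje
          simp only [hjx, if_pos hxn]
          simp
          omega
        · have hjx : ¬((j : Int) = x) := by omega
          simp only [hje, if_neg hjx]
          split <;> simp
    · have hstep : (if 0 ≤ ((k0, x) : Int × Int).2 ∧ ((k0, x) : Int × Int).2 < (n : Int) then
            s.modify ((k0, x) : Int × Int).2.toNat (· + ((k0, x) : Int × Int).1) else s) = s := by
        simp only []
        rw [if_neg hg]
      rw [hstep, ih]
      apply List.ext_getElem
      · simp
      · intro j h1 h2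
        simp only [List.getElem_mapIdx, pv_incOff_cons]
        by_cases hjn : j < n
        · have hjx : ¬((j : Int) = x) := by omega
          simp [hjn, hjx]
        · simp [hjn]

lemma pv_enum_positions (l : List Int) : ∀ (k0 v : Int),
    (((PySem.List.enumerate l k0).map Prod.swap).filter (fun q => q.1 == v)).map (fun q => q.2)
      = ((List.range l.length).filter (fun j => decide (v = l.getD j 0))).map
          (fun (j : Nat) => (j : Int) + k0) := by
  induction l with
  | nil => intro k0 v; simp [PySem.List.enumerate]
  | cons y t ih =>
    intro k0 v
    have hmap : ∀ L : List Nat,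
        (L.map Nat.succ).map (fun (j : Nat) => (j : Int) + k0)
          = L.map (fun (j : Nat) => (j : Int) + (k0 + 1)) := by
      intro L
      rw [List.map_map]
      apply List.map_congr_left
      intro b _
      simp only [Function.comp]
      push_cast
      ring
    have htail : List.filter ((fun j => decide (v = (y :: t).getD j 0)) ∘ Nat.succ)
          (List.range t.length)
        = List.filter (fun j => decide (v = t.getD j 0)) (List.range t.length) := by
      apply List.filter_congr
      intro a _
      simp [Function.comp]
    rw [PySem.List.enumerate_cons, List.map_cons, List.filter_cons,
      List.length_cons, List.range_succ_eq_map, List.filter_cons]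
    by_cases h : y = v
    · rw [if_pos (show (((k0, y).swap.1 == v) = true) from by simpa using h),
        if_pos (show (decide (v = (y :: t).getD 0 0) = true) from by simpa using h.symm),
        List.map_cons, List.map_cons, ih (k0 + 1) v, List.filter_map, htail, hmap]
      simp
    · rw [if_neg (show ¬(((k0, y).swap.1 == v) = true) from by simpa using h),
        if_neg (show ¬(decide (v = (y :: t).getD 0 0) = true) from by
          simpa using fun hv => h hv.symm),
        ih (k0 + 1) v, List.filter_map, htail, hmap]
lemma pv_group_getD (l : List Int) (v : Int) : (pvB_group l).getD v [] = pvBlockOf l v := by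
  unfold pvB_group
  have hb : ∀ (L : List (Int × Int)) (d : PySem.Dict Int (List Int)),
      L.foldl (fun d p => d.modify p.2 [] (· ++ [p.1])) d
        = (L.map Prod.swap).foldl (fun d q => d.modify q.1 [] (· ++ [q.2])) d := by
    intro L
    induction L with
    | nil => intro d; simp
    | cons p L ihL => intro d; simp [ihL]
  rw [hb, PySem.Dict.getD_foldl_modify_append]
  simp only [PySem.Dict.getD_empty, List.nil_append]
  exact pv_enum_positions l 1 v

lemma pv_group_keys (l : List Int) : (pvB_group l).keys = pvD l := by
  unfold pvB_group
  rw [PySem.Dict.keys_foldl_modify_key (PySem.List.enumerate l 1) Prod.snd []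
    (fun _ p => (· ++ [p.1])) PySem.Dict.empty]
  rw [PySem.List.map_snd_enumerate]
  simp only [PySem.Dict.keys_empty]
  rw [show PySem.Set.update ([] : PySem.Set Int) l = l.foldl PySem.Set.add [] from rfl,
    pv_foldl_add]
  simp

lemma pv_pvD_sorted (l : List Int) :
    pvD (PySem.List.sorted l (fun x => x) false)
      = PySem.List.sorted (pvD l) (fun x => x) false := by
  apply List.Perm.eq_of_pairwise (le := fun (a b : Int) => a ≤ b)
  · intro a b _ _ hab hba
    omega
  · exact List.Pairwise.sublist (pvD_sublist _)
      (PySem.List.sorted_pairwise l (fun x => x))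
  · exact PySem.List.sorted_pairwise (pvD l) (fun x => x)
  · rw [List.perm_ext_iff_of_nodup (pvD_nodup _)
      (((PySem.List.sorted_perm (pvD l) (fun x => x) false).symm).nodup (pvD_nodup l))]
    intro a
    rw [pvD_mem, PySem.List.mem_sorted, PySem.List.mem_sorted, pvD_mem]

lemma pv_stepC (r1 r2 r3 : List Int) (m : Nat) (hmn : m < r1.length)
    (hz : ∀ j : Nat, j < r1.length →
      r1.countP (fun x => decide (0 ≤ x ∧ x ≤ (j : Int))) ≤ j → pvInc r2 j = 0 ∧ pvInc r3 j = 0) :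
    (((pvBase r1 m).mapIdx (fun k x => if k < m then x + pvInc r2 k + pvInc r3 k else x)
        ++ pvBlockOf r1 (m : Int)).modify m (· + pvInc r2 m)).modify m (· + pvInc r3 m)
      = (pvBase r1 (m + 1)).mapIdx
          (fun k x => if k < m + 1 then x + pvInc r2 k + pvInc r3 k else x) := by
  have hbase1 : pvBase r1 (m + 1) = pvBase r1 m ++ pvBlockOf r1 (m : Int) := by
    unfold pvBase
    rw [List.range_succ, List.flatMap_append, List.flatMap_singleton]
  rw [pv_modify_modify, hbase1]
  apply List.ext_getElem
  · simp
  · intro j hj1 hj2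
    rw [List.getElem_modify, List.getElem_mapIdx]
    rcases Nat.lt_or_ge j (pvBase r1 m).length with hjb | hjb
    · rw [List.getElem_append_left hjb,
        List.getElem_append_left (by simpa using hjb), List.getElem_mapIdx]
      by_cases hjm : m = j
      · subst hjm
        rw [if_pos rfl, if_neg (lt_irrefl m), if_pos (Nat.lt_succ_self m)]
      · rw [if_neg hjm]
        by_cases hjlt : j < m
        · rw [if_pos hjlt, if_pos (by omega : j < m + 1)]
        · rw [if_neg hjlt, if_neg (by omega : ¬ j < m + 1)]
    · rw [List.getElem_append_right (by simpa using hjb),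
        List.getElem_append_right hjb]
      simp only [List.length_mapIdx]
      by_cases hjm : m = j
      · subst hjm
        rw [if_pos rfl, if_pos (Nat.lt_succ_self m)]
      · rw [if_neg hjm]
        by_cases hjlt : j < m + 1
        · have hcnt : r1.countP (fun x => decide (0 ≤ x ∧ x ≤ (j : Int))) ≤ j := by
            have hmono : r1.countP (fun x => decide (0 ≤ x ∧ x ≤ (j : Int)))
                ≤ r1.countP (fun x => decide (0 ≤ x ∧ x < (m : Int))) := by
              apply List.countP_mono_left
              intro x _ hx
              simp only [decide_eq_true_eq] at hx ⊢
              omega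
            have hbl := pv_base_length r1 m
            omega
          obtain ⟨hz2, hz3⟩ := hz j (by omega) hcnt
          rw [if_pos hjlt, hz2, hz3]
          ring
        · rw [if_neg hjlt]
lemma pvA_phase1 (r1 r2 r3 : List Int)
    (hz : ∀ j : Nat, j < r1.length →
      r1.countP (fun x => decide (0 ≤ x ∧ x ≤ (j : Int))) ≤ j → pvInc r2 j = 0 ∧ pvInc r3 j = 0) :
    ∀ m, m ≤ r1.length → (List.range m).foldl (pvA_step r1 r2 r3) []
      = (pvBase r1 m).mapIdx (fun k x => if k < m then x + pvInc r2 k + pvInc r3 k else x) := by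
  intro m
  induction m with
  | zero => intro _; simp [pvBase]
  | succ m ih =>
    intro hm'
    rw [List.range_succ, List.foldl_append, List.foldl_cons, List.foldl_nil, ih (by omega)]
    simp only [pvA_step]
    rw [PySem.List.foldl_append_ite (fun a => (m : Int) = r1.getD a 0)
        (fun (a : Nat) => (a : Int) + 1),
      pv_modify_fold2 (List.range r2.length) (fun b => (m : Int) = r2.getD b 0)
        (fun (b : Nat) => (b : Int) + 1) m,
      pv_modify_fold2 (List.range r3.length) (fun c => (m : Int) = r3.getD c 0)
        (fun (c : Nat) => (c : Int) + 1) m]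
    exact pv_stepC r1 r2 r3 m (by omega) hz

-- ===== VERDICT (by name: the statement is the Claim_ definition above) =====
theorem jons_final_seq_spec : Claim_equal_jons_final_seq := by
  intro r1 r2 r3 _ hpre
  have hz : ∀ j : Nat, j < r1.length →
      r1.countP (fun x => decide (0 ≤ x ∧ x ≤ (j : Int))) ≤ j → pvInc r2 j = 0 ∧ pvInc r3 j = 0 := by
    intro j hj hcnt
    constructor
    · apply pvInc_zero_of_not_mem
      intro hmem
      exact absurd (hpre j hj (Or.inl hmem)) (by omega)
    · apply pvInc_zero_of_not_mem
      intro hmem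
      exact absurd (hpre j hj (Or.inr hmem)) (by omega)
  show jons_final_seq r1 r2 r3 = jons_final_seq_alt r1 r2 r3
  have hA : jons_final_seq r1 r2 r3
      = (PySem.List.sorted (pvD (pvSums r1 r2 r3)) (fun x => x) false).flatMap
          (pvBlockOf (pvSums r1 r2 r3)) := by
    simp only [jons_final_seq]
    rw [pvA_phase1 r1 r2 r3 hz r1.length le_rfl]
    rw [show (pvBase r1 r1.length).mapIdx
          (fun k x => if k < r1.length then x + pvInc r2 k + pvInc r3 k else x)
        = pvSums r1 r2 r3 from rfl]
    rw [PySem.List.foldl_congr_mem _ _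
      (fun (racc : List Int) (v : Int) => racc ++ pvBlockOf (pvSums r1 r2 r3) v) _ ?hfun]
    case hfun =>
      intro racc v _
      exact PySem.List.foldl_append_ite (fun j => v = (pvSums r1 r2 r3).getD j 0)
        (fun (j : Nat) => (j : Int) + 1) _ racc
    rw [PySem.List.foldl_append_eq_flatMap (pvBlockOf (pvSums r1 r2 r3)) _ [], List.nil_append,
      pv_dedup_eq_pvD,
      pvD_flatMap _ _ (fun v => pv_blockOf_nodup _ v) (pv_blockOf_disj _),
      pv_pvD_sorted]
  have hB : jons_final_seq_alt r1 r2 r3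
      = (PySem.List.sorted (pvD (pvSums r1 r2 r3)) (fun x => x) false).flatMap
          (pvBlockOf (pvSums r1 r2 r3)) := by
    simp only [jons_final_seq_alt]
    have hbase : (List.range r1.length).foldl
          (fun s (i : Nat) => s ++ (pvB_group r1).getD (i : Int) []) []
        = pvBase r1 r1.length := by
      rw [PySem.List.foldl_append_eq_flatMap (fun (i : Nat) => (pvB_group r1).getD (i : Int) []) _ [],
        List.nil_append]
      unfold pvBase
      simp only [pv_group_getD]
    rw [hbase]
    rw [show pvB_addPass r1.length (pvBase r1 r1.length) r2
        = (pvBase r1 r1.length).mapIdx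
            (fun k x => if k < r1.length then x + pvInc r2 k else x) from
      pv_addPass_fold r1.length r2 1 (pvBase r1 r1.length)]
    rw [show pvB_addPass r1.length
          ((pvBase r1 r1.length).mapIdx (fun k x => if k < r1.length then x + pvInc r2 k else x)) r3
        = ((pvBase r1 r1.length).mapIdx
            (fun k x => if k < r1.length then x + pvInc r2 k else x)).mapIdx
            (fun k x => if k < r1.length then x + pvInc r3 k else x) from
      pv_addPass_fold r1.length r3 1 _]
    rw [List.mapIdx_mapIdx]
    have hsums : (pvBase r1 r1.length).mapIdx
          (fun i => (fun k x => if k < r1.length then x + pvInc r3 k else x) i ∘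
            (fun k x => if k < r1.length then x + pvInc r2 k else x) i)
        = pvSums r1 r2 r3 := by
      unfold pvSums
      apply List.ext_getElem
      · simp
      · intro j h1 h2
        simp only [List.getElem_mapIdx, Function.comp]
        split <;> simp_all
    rw [hsums]
    rw [pv_group_keys]
    rw [PySem.List.foldl_congr_mem _ _
      (fun (out : List Int) (v : Int) => out ++ pvBlockOf (pvSums r1 r2 r3) v) _ ?hgetd]
    case hgetd =>
      intro acc v _
      rw [pv_group_getD]
    rw [PySem.List.foldl_append_eq_flatMap (pvBlockOf (pvSums r1 r2 r3)) _ [], List.nil_append]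
  rw [hA, hB]
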